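-- pv_equiv track=rewrite | github.com/MrBrantCode/unitest_baseline | mut_generate/mist_train_taco/taco_13354/solution.py | count_n_digit_numbers
-- ===== SOURCE A (Python) =====
-- from math import factorial
--
-- def choose(n, k):
--     total = factorial(n) // factorial(k)
--     total = total // factorial(n - k)
--     return int(total)
--
-- def incl(n, k, i):
--     total = 1
--     for j in range(0, i):
--         total = (10 - j) * total * choose(n - j * k, k)
--     return total
--
-- def excl(n, k, i):
--     total = choose(n - 1, k - 1)
--     for j in range(1, i):
--         total = (10 - j - 1) * total * choose(n - j * k, k)
--     return total
--
-- def count_n_digit_numbers(n, k):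
--     k += 1  # Adjust k as per the original code logic
--     total = 10 ** n - 10 ** (n - 1)
--     i = 1
--     while n >= i * k:
--         if i % 2 == 1:
--             total = total - incl(n, k, i) + excl(n, k, i)
--         else:
--             total = total + incl(n, k, i) - excl(n, k, i)
--         i += 1
--     return total % (10 ** 9 + 7)
-- ===== SOURCE B (Python) =====
-- from math import factorial
--
-- def choose(n, k):
--     return factorial(n) // (factorial(k) * factorial(n - k))
--
-- def count_n_digit_numbers(n, k):
--     # Incremental inclusion-exclusion: maintain the two running products
--     # instead of recomputing them from scratch at every term.
--     k += 1
--     total = 10 ** n - 10 ** (n - 1)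
--     mod = 10 ** 9 + 7
--     if n < k:
--         return total % mod
--     incl_p = 1
--     excl_p = choose(n - 1, k - 1)
--     sign = -1
--     i = 1
--     while n >= i * k:
--         c = choose(n - (i - 1) * k, k)
--         incl_p *= (10 - (i - 1)) * c
--         if i > 1:
--             excl_p *= (10 - i) * c
--         total += sign * (incl_p - excl_p)
--         sign = -sign
--         i += 1
--     return total % mod
-- ===== Notes on version B (the rewrite author's own statement) =====
-- stated objective: alternative
-- what changed: B keeps the inclusion-exclusion loop but maintains the incl/excl products incrementally across iterations (one update each per step), removing A's helpers that rebuild each product from scratch with an inner loop; fewer choose computations, though bigint factorial cost dominates at scale.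
-- outside the precondition, e.g. on count_n_digit_numbers(0, 2): A returns 0.9, B returns 0.9; on count_n_digit_numbers(2, -1): A raises ValueError, B raises ValueError
import Mathlib
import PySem

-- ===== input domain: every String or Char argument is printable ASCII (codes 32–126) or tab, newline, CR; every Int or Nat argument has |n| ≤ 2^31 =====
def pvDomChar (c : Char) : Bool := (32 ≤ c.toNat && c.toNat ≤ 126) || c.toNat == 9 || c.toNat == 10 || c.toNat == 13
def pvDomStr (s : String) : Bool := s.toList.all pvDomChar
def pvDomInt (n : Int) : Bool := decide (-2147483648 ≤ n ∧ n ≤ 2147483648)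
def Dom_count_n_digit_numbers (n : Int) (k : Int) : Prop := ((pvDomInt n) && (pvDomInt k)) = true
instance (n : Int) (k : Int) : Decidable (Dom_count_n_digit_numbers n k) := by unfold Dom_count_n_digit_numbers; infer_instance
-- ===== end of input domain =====

-- B replaces A's from-scratch recomputation of the incl/excl products at every
-- inclusion-exclusion term by two running products updated once per iteration (objective: alternative single-pass accumulation).

-- ===== PORT A =====
-- math.factorial(n); Python raises for n < 0, which Pre_ excludes (toNat is exact on the admitted calls).
def pyFact (n : Int) : Int := (n.toNat.factorial : Int)

def chooseA (n : Int) (k : Int) : Int :=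
  PySem.Int.floordiv (PySem.Int.floordiv (pyFact n) (pyFact k)) (pyFact (n - k))

def inclA (n : Int) (k : Int) (i : Int) : Int :=
  (PySem.List.pyRange 0 i 1).foldl (fun total j => (10 - j) * total * chooseA (n - j * k) k) 1

def exclA (n : Int) (k : Int) (i : Int) : Int :=
  (PySem.List.pyRange 1 i 1).foldl (fun total j => (10 - j - 1) * total * chooseA (n - j * k) k)
    (chooseA (n - 1) (k - 1))

-- the while loop; fuel n.toNat + 1 is a totality guard only: under Pre_ (k+1 ≥ 1) the loop
-- runs at most n times, so the fuel is never exhausted.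
def loopA (n : Int) (k : Int) : Nat → Int → Int → Int
  | 0, _, total => total
  | fuel + 1, i, total =>
    if n ≥ i * k then
      loopA n k fuel (i + 1)
        (if PySem.Int.mod i 2 = 1 then total - inclA n k i + exclA n k i
         else total + inclA n k i - exclA n k i)
    else total

-- 10 ** n and 10 ** (n-1): exact for n ≥ 1 (Pre_); for n ≤ 0 Python produces a float.
def count_n_digit_numbers (n : Int) (k : Int) : Int :=
  let k' := k + 1
  let total := (10 : Int) ^ n.toNat - 10 ^ (n - 1).toNat
  PySem.Int.mod (loopA n k' (n.toNat + 1) 1 total) (10 ^ 9 + 7)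

-- ===== PORT B =====
def chooseB (n : Int) (k : Int) : Int :=
  PySem.Int.floordiv (pyFact n) (pyFact k * pyFact (n - k))

def loopB (n : Int) (k : Int) : Nat → Int → Int → Int → Int → Int → Int
  | 0, _, _, _, _, total => total
  | fuel + 1, i, sign, inclP, exclP, total =>
    if n ≥ i * k then
      let c := chooseB (n - (i - 1) * k) k
      let inclP' := inclP * ((10 - (i - 1)) * c)
      let exclP' := if 1 < i then exclP * ((10 - i) * c) else exclP
      loopB n k fuel (i + 1) (-sign) inclP' exclP' (total + sign * (inclP' - exclP'))
    else total

def count_n_digit_numbers_alt (n : Int) (k : Int) : Int :=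
  let k' := k + 1
  let total := (10 : Int) ^ n.toNat - 10 ^ (n - 1).toNat
  let m : Int := 10 ^ 9 + 7
  if n < k' then PySem.Int.mod total m
  else PySem.Int.mod (loopB n k' (n.toNat + 1) 1 (-1) 1 (chooseB (n - 1) (k' - 1)) total) m

-- ===== PRECONDITION & SPEC =====
-- For n ≤ 0 Python's 10 ** (n-1) is a float, so A returns a float, not an int;
-- for k < 0 the first loop iteration calls factorial on a negative argument and A raises ValueError.
def Pre_count_n_digit_numbers (n : Int) (k : Int) : Prop := 1 ≤ n ∧ 0 ≤ k
instance (n : Int) (k : Int) : Decidable (Pre_count_n_digit_numbers n k) := by unfold Pre_count_n_digit_numbers; infer_instance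

def pvWitness_count_n_digit_numbers : Int × Int := (5, 1)

def Spec_count_n_digit_numbers (n : Int) (k : Int) (out : Int) : Prop := out = count_n_digit_numbers_alt n k
instance (n : Int) (k : Int) (out : Int) : Decidable (Spec_count_n_digit_numbers n k out) := by unfold Spec_count_n_digit_numbers; infer_instance

-- ===== CLAIM (what is proved, stated in full; the proofs are below) =====
def Claim_equal_count_n_digit_numbers : Prop := ∀ (n : Int) (k : Int), Dom_count_n_digit_numbers n k → Pre_count_n_digit_numbers n k → Spec_count_n_digit_numbers n k (count_n_digit_numbers n k)

-- ===== LEMMAS AND PROOFS =====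
lemma choose_eq (n k : Int) : chooseA n k = chooseB n k := by
  unfold chooseA chooseB pyFact
  rw [show ((k.toNat.factorial : Int)) * ((n - k).toNat.factorial : Int)
        = ((k.toNat.factorial * (n - k).toNat.factorial : Nat) : Int) by push_cast; ring,
      PySem.Int.floordiv_natCast, PySem.Int.floordiv_natCast, PySem.Int.floordiv_natCast,
      Nat.div_div_eq_div_mul]

lemma inclA_zero (n k : Int) : inclA n k 0 = 1 := by
  unfold inclA
  rw [PySem.List.pyRange_one_eq_nil (le_refl 0)]
  rfl

lemma exclA_one (n k : Int) : exclA n k 1 = chooseA (n - 1) (k - 1) := by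
  unfold exclA
  rw [PySem.List.pyRange_one_eq_nil (le_refl 1)]
  rfl

lemma inclA_succ (n k i : Int) (hi : 0 ≤ i) :
    inclA n k (i + 1) = (10 - i) * inclA n k i * chooseA (n - i * k) k := by
  unfold inclA
  rw [PySem.List.pyRange_one_succ_right hi, List.foldl_append]
  rfl

lemma exclA_succ (n k i : Int) (hi : 1 ≤ i) :
    exclA n k (i + 1) = (10 - i - 1) * exclA n k i * chooseA (n - i * k) k := by
  unfold exclA
  rw [PySem.List.pyRange_one_succ_right hi, List.foldl_append]
  rfl

lemma loop_eq (n k : Int) : ∀ (fuel : Nat) (i total sign inclP exclP : Int),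
    1 ≤ i →
    sign = (if PySem.Int.mod i 2 = 1 then (-1 : Int) else 1) →
    inclP = inclA n k (i - 1) →
    exclP = exclA n k (max 1 (i - 1)) →
    loopB n k fuel i sign inclP exclP total = loopA n k fuel i total := by
  intro fuel
  induction fuel with
  | zero => intro i total sign inclP exclP _ _ _ _; rfl
  | succ f ih =>
    intro i total sign inclP exclP hi hs hip hep
    have hmod : PySem.Int.mod i 2 = i % 2 := PySem.Int.mod_eq_emod_of_pos (by norm_num)
    have hmod' : PySem.Int.mod (i + 1) 2 = (i + 1) % 2 := PySem.Int.mod_eq_emod_of_pos (by norm_num)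
    simp only [loopA, loopB]
    by_cases hcond : n ≥ i * k
    · rw [if_pos hcond, if_pos hcond]
      have hip' : inclP * ((10 - (i - 1)) * chooseB (n - (i - 1) * k) k) = inclA n k i := by
        rw [← choose_eq]
        have := inclA_succ n k (i - 1) (by omega)
        rw [show i - 1 + 1 = i by ring] at this
        rw [this, hip]; ring
      have hep' : (if 1 < i then exclP * ((10 - i) * chooseB (n - (i - 1) * k) k) else exclP)
          = exclA n k i := by
        rw [← choose_eq]
        by_cases h1 : 1 < i
        · rw [if_pos h1]
          have := exclA_succ n k (i - 1) (by omega)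
          rw [show i - 1 + 1 = i by ring] at this
          rw [this, hep, show max 1 (i - 1) = i - 1 by omega]; ring
        · rw [if_neg h1]
          have hi1 : i = 1 := by omega
          rw [hep, hi1]
          norm_num
      rw [hip', hep']
      have := ih (i + 1)
        (total + sign * (inclA n k i - exclA n k i))
        (-sign) (inclA n k i) (exclA n k (max 1 i))
        (by omega)
        (by
          rw [hmod'] ; rw [hmod] at hs
          rcases Int.emod_two_eq_zero_or_one i with h | h
          · rw [h] at hs
            rw [show (i + 1) % 2 = 1 by omega]
            simp at hs ⊢
            omega
          · rw [h] at hs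
            rw [show (i + 1) % 2 = 0 by omega]
            simp at hs ⊢
            omega)
        (by rw [show i + 1 - 1 = i by ring])
        (by rw [show max 1 (i + 1 - 1) = max 1 i by omega])
      rw [show max 1 i = i by omega] at this
      rw [this]
      congr 1
      rw [hmod] at hs
      rcases Int.emod_two_eq_zero_or_one i with h | h
      · rw [h] at hs; simp at hs
        rw [hmod, h, hs]
        norm_num; ring
      · rw [h] at hs; simp at hs
        rw [hmod, h, hs]
        norm_num; ring
    · rw [if_neg hcond, if_neg hcond]

-- ===== VERDICT (by name: the statement is the Claim_ definition above) =====
theorem count_n_digit_numbers_spec : Claim_equal_count_n_digit_numbers := by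
  intro n k _ hpre
  obtain ⟨hn, hk⟩ := hpre
  unfold Spec_count_n_digit_numbers count_n_digit_numbers count_n_digit_numbers_alt
  by_cases hlt : n < k + 1
  · rw [if_pos hlt]
    simp only [loopA]
    rw [if_neg (by omega)]
  · rw [if_neg hlt]
    rw [loop_eq n (k + 1) (n.toNat + 1) 1 _ (-1) 1 (chooseB (n - 1) (k + 1 - 1))
      (by omega)
      (by decide)
      (by norm_num [inclA_zero])
      (by rw [show max 1 (1 - 1 : Int) = 1 by norm_num, exclA_one, choose_eq])]
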